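-- pv_equiv track=rewrite | github.com/edrickchang13/jobs | applicator/greenhouse_handler.py | _value_for_label
-- ===== SOURCE A (Python) =====
-- from typing import Callable, Optional
--
-- def _value_for_label(label: str, known: dict, personal: dict) -> Optional[str]:
--     """Return a value for a Greenhouse field based on its label text."""
--     l = label.lower().strip()
--     if not l:
--         return None
--
--     # Direct key hits
--     for k, v in known.items():
--         if k.replace("_", " ") in l or l.startswith(k.replace("_", " ")):
--             return v
--
--     # Fuzzy label matching
--     if any(x in l for x in ("first name", "given name")):
--         return known["first_name"]
--     if any(x in l for x in ("last name", "surname", "family name")):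
--         return known["last_name"]
--     if "email" in l:
--         return known["email"]
--     if "phone" in l or "mobile" in l or "tel" in l:
--         return known["phone"]
--     if "linkedin" in l:
--         return known["linkedin"]
--     if "github" in l:
--         return known["github"]
--     if "website" in l or "portfolio" in l or "url" in l:
--         return known["website"]
--     if "school" in l or "university" in l or "college" in l or "institution" in l:
--         return known["school_name"]
--     if "degree" in l:
--         return known["degree"]
--     if "major" in l or "discipline" in l or "field of study" in l:
--         return known["discipline"]
--     if "gpa" in l:
--         return known["gpa"]
--     if "graduation" in l and "year" in l:
--         return known["end_year"]
--     if "graduation" in l and "month" in l: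
--         return "June"
--     if "authorized" in l or "eligible to work" in l or "work authorization" in l:
--         return "Yes"
--     if "sponsor" in l or "visa" in l:
--         return "No"
--     if "gender" in l:
--         return known["gender"]
--     if "race" in l or "ethnic" in l:
--         return known["race"]
--     if "veteran" in l:
--         return known["veteran_status"]
--     if "disability" in l or "disabled" in l:
--         return known["disability_status"]
--     if "referral" in l or "hear about" in l or "source" in l or "how did you" in l:
--         return known["referral"]
--     if "city" in l or "location" in l:
--         return known["city"]
--     if "state" in l:
--         return known["state"]
--     if "country" in l:
--         return known["country"]
--     if "name" in l:
--         return f"{known['first_name']} {known['last_name']}"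
--
--     return None
-- ===== SOURCE B (Python) =====
-- from typing import Optional
--
-- # Keyword tokens searched for in one pass over the label.
-- _PATTERNS = ("first name", "given name", "last name", "surname", "family name",
--              "email", "phone", "mobile", "tel", "linkedin", "github", "website",
--              "portfolio", "url", "school", "university", "college", "institution",
--              "degree", "major", "discipline", "field of study", "gpa",
--              "graduation", "year", "month", "authorized", "eligible to work",
--              "work authorization", "sponsor", "visa", "gender", "race", "ethnic",
--              "veteran", "disability", "disabled", "referral", "hear about",
--              "source", "how did you", "city", "location", "state", "country", "name")
--
-- # Each actionable token -> priority (= rule rank); smallest matched priority wins.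
-- _PRI = {"first name": 0, "given name": 0, "last name": 1, "surname": 1,
--         "family name": 1, "email": 2, "phone": 3, "mobile": 3, "tel": 3,
--         "linkedin": 4, "github": 5, "website": 6, "portfolio": 6, "url": 6,
--         "school": 7, "university": 7, "college": 7, "institution": 7,
--         "degree": 8, "major": 9, "discipline": 9, "field of study": 9,
--         "gpa": 10, "graduation+year": 11, "graduation+month": 12,
--         "authorized": 13, "eligible to work": 13, "work authorization": 13,
--         "sponsor": 14, "visa": 14, "gender": 15, "race": 16, "ethnic": 16,
--         "veteran": 17, "disability": 18, "disabled": 18, "referral": 19,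
--         "hear about": 19, "source": 19, "how did you": 19, "city": 20,
--         "location": 20, "state": 21, "country": 22, "name": 23}
--
-- # priority -> action: ("k", key) = known[key]; ("v", s) = literal; ("n", _) = full name.
-- _ACT = [("k", "first_name"), ("k", "last_name"), ("k", "email"), ("k", "phone"),
--         ("k", "linkedin"), ("k", "github"), ("k", "website"), ("k", "school_name"),
--         ("k", "degree"), ("k", "discipline"), ("k", "gpa"), ("k", "end_year"),
--         ("v", "June"), ("v", "Yes"), ("v", "No"), ("k", "gender"), ("k", "race"),
--         ("k", "veteran_status"), ("k", "disability_status"), ("k", "referral"),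
--         ("k", "city"), ("k", "state"), ("k", "country"), ("n", "")]
--
-- def _value_for_label(label: str, known: dict, personal: dict) -> Optional[str]:
--     l = label.lower().strip()
--     if not l:
--         return None
--     for k, v in known.items():
--         kk = k.replace("_", " ")
--         if kk in l or l.startswith(kk):
--             return v
--     # One left-to-right pass over the label collects every keyword occurring in it.
--     found = {p for i in range(len(l)) for p in _PATTERNS if l.startswith(p, i)}
--     if "graduation" in found and "year" in found:
--         found.add("graduation+year")
--     if "graduation" in found and "month" in found:
--         found.add("graduation+month")
--     hits = [_PRI[t] for t in found if t in _PRI]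
--     if not hits:
--         return None
--     kind, arg = _ACT[min(hits)]
--     if kind == "k":
--         return known[arg]
--     if kind == "v":
--         return arg
--     return f"{known['first_name']} {known['last_name']}"
-- ===== Notes on version B (the rewrite author's own statement) =====
-- stated objective: alternative
-- what changed: The 24-branch fuzzy if-chain of repeated substring tests is replaced by a single left-to-right scan of the label that collects the set of keyword tokens occurring in it, followed by choosing the minimum-priority matched token from a token->priority table and applying its action.
import Mathlib
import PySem

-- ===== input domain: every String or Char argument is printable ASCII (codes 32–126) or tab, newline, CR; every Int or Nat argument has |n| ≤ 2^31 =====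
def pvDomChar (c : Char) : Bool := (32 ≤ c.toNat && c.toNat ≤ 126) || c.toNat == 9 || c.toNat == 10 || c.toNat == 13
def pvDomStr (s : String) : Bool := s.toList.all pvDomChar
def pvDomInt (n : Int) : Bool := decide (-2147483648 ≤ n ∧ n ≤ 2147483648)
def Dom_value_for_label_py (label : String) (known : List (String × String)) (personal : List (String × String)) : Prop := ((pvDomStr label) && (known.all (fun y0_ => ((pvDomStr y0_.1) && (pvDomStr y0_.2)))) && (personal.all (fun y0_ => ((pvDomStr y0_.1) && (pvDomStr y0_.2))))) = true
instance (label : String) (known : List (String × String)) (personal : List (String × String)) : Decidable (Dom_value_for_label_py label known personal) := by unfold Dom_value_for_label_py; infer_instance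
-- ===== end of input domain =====

-- B replaces A's 24-branch fuzzy if-chain by a different algorithm: one left-to-right scan of the
-- label collects the set of keyword tokens it contains, and the answer is the action of the
-- minimum-priority token found (objective: alternative); Pre_ excludes exactly the inputs on
-- which both Pythons raise KeyError.


-- shared by both ports (both Pythons contain this lookup and this loop verbatim):
-- dict lookup known[k] (none = KeyError, excluded by Pre_)
def pvLookup (known : List (String × String)) (k : String) : Option String :=
  PySem.Dict.get? (PySem.Dict.mk known) k

-- the direct-key-hit loop 'for k, v in known.items(): …'
def pvDirectLoop (l : String) : List (String × String) → Option String
  | [] => none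
  | (k, v) :: rest =>
    if PySem.Str.isIn (PySem.Str.replace k "_" " ") l
       || PySem.Str.startswith l (PySem.Str.replace k "_" " ") then some v
    else pvDirectLoop l rest

-- ===== PORT A =====
-- the fuzzy if-chain of A, branch for branch
def pvChainA (l : String) (known : List (String × String)) : Option String :=
  if PySem.Str.isIn "first name" l || PySem.Str.isIn "given name" l then pvLookup known "first_name"
  else if PySem.Str.isIn "last name" l || PySem.Str.isIn "surname" l || PySem.Str.isIn "family name" l then pvLookup known "last_name"
  else if PySem.Str.isIn "email" l then pvLookup known "email"
  else if PySem.Str.isIn "phone" l || PySem.Str.isIn "mobile" l || PySem.Str.isIn "tel" l then pvLookup known "phone"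
  else if PySem.Str.isIn "linkedin" l then pvLookup known "linkedin"
  else if PySem.Str.isIn "github" l then pvLookup known "github"
  else if PySem.Str.isIn "website" l || PySem.Str.isIn "portfolio" l || PySem.Str.isIn "url" l then pvLookup known "website"
  else if PySem.Str.isIn "school" l || PySem.Str.isIn "university" l || PySem.Str.isIn "college" l || PySem.Str.isIn "institution" l then pvLookup known "school_name"
  else if PySem.Str.isIn "degree" l then pvLookup known "degree"
  else if PySem.Str.isIn "major" l || PySem.Str.isIn "discipline" l || PySem.Str.isIn "field of study" l then pvLookup known "discipline"
  else if PySem.Str.isIn "gpa" l then pvLookup known "gpa"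
  else if PySem.Str.isIn "graduation" l && PySem.Str.isIn "year" l then pvLookup known "end_year"
  else if PySem.Str.isIn "graduation" l && PySem.Str.isIn "month" l then some "June"
  else if PySem.Str.isIn "authorized" l || PySem.Str.isIn "eligible to work" l || PySem.Str.isIn "work authorization" l then some "Yes"
  else if PySem.Str.isIn "sponsor" l || PySem.Str.isIn "visa" l then some "No"
  else if PySem.Str.isIn "gender" l then pvLookup known "gender"
  else if PySem.Str.isIn "race" l || PySem.Str.isIn "ethnic" l then pvLookup known "race"
  else if PySem.Str.isIn "veteran" l then pvLookup known "veteran_status"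
  else if PySem.Str.isIn "disability" l || PySem.Str.isIn "disabled" l then pvLookup known "disability_status"
  else if PySem.Str.isIn "referral" l || PySem.Str.isIn "hear about" l || PySem.Str.isIn "source" l || PySem.Str.isIn "how did you" l then pvLookup known "referral"
  else if PySem.Str.isIn "city" l || PySem.Str.isIn "location" l then pvLookup known "city"
  else if PySem.Str.isIn "state" l then pvLookup known "state"
  else if PySem.Str.isIn "country" l then pvLookup known "country"
  else if PySem.Str.isIn "name" l then
    match pvLookup known "first_name", pvLookup known "last_name" with
    | some f, some s => some (f ++ " " ++ s)
    | _, _ => none   -- KeyError in Python; excluded by Pre_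
  else none

def value_for_label_py (label : String) (known : List (String × String)) (personal : List (String × String)) : Option String :=
  let l := PySem.Str.strip (PySem.Str.lower label)
  if l = "" then none
  else match pvDirectLoop l known with
  | some v => some v
  | none => pvChainA l known

-- ===== PORT B =====
-- _PATTERNS of Source B
def pvPatterns : List String :=
  ["first name", "given name", "last name", "surname", "family name",
   "email", "phone", "mobile", "tel", "linkedin", "github", "website",
   "portfolio", "url", "school", "university", "college", "institution",
   "degree", "major", "discipline", "field of study", "gpa",
   "graduation", "year", "month", "authorized", "eligible to work",
   "work authorization", "sponsor", "visa", "gender", "race", "ethnic",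
   "veteran", "disability", "disabled", "referral", "hear about",
   "source", "how did you", "city", "location", "state", "country", "name"]

-- _PRI of Source B (token -> priority)
def pvPriDict : PySem.Dict String Int :=
  PySem.Dict.mk
  [("first name", 0), ("given name", 0), ("last name", 1), ("surname", 1),
   ("family name", 1), ("email", 2), ("phone", 3), ("mobile", 3), ("tel", 3),
   ("linkedin", 4), ("github", 5), ("website", 6), ("portfolio", 6), ("url", 6),
   ("school", 7), ("university", 7), ("college", 7), ("institution", 7),
   ("degree", 8), ("major", 9), ("discipline", 9), ("field of study", 9),
   ("gpa", 10), ("graduation+year", 11), ("graduation+month", 12),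
   ("authorized", 13), ("eligible to work", 13), ("work authorization", 13),
   ("sponsor", 14), ("visa", 14), ("gender", 15), ("race", 16), ("ethnic", 16),
   ("veteran", 17), ("disability", 18), ("disabled", 18), ("referral", 19),
   ("hear about", 19), ("source", 19), ("how did you", 19), ("city", 20),
   ("location", 20), ("state", 21), ("country", 22), ("name", 23)]

-- _ACT of Source B (priority -> action)
def pvActs : List (String × String) :=
  [("k", "first_name"), ("k", "last_name"), ("k", "email"), ("k", "phone"),
   ("k", "linkedin"), ("k", "github"), ("k", "website"), ("k", "school_name"),
   ("k", "degree"), ("k", "discipline"), ("k", "gpa"), ("k", "end_year"),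
   ("v", "June"), ("v", "Yes"), ("v", "No"), ("k", "gender"), ("k", "race"),
   ("k", "veteran_status"), ("k", "disability_status"), ("k", "referral"),
   ("k", "city"), ("k", "state"), ("k", "country"), ("n", "")]

-- the set comprehension: one pass over the label, l.startswith(p, i) checked at each i
-- (Chars.startswith on l.toList.drop i is exact for 0 ≤ i ≤ len(l))
def pvScan (l : String) : PySem.Set String :=
  (List.range l.toList.length).foldl (fun acc i =>
    pvPatterns.foldl (fun acc p =>
      if PySem.Chars.startswith (l.toList.drop i) p.toList then PySem.Set.add acc p else acc) acc)
    PySem.Set.empty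

-- the two 'if "graduation" in found and … : found.add(…)' statements
def pvCombine (s : PySem.Set String) : PySem.Set String :=
  let s1 := if PySem.Set.contains s "graduation" && PySem.Set.contains s "year"
            then PySem.Set.add s "graduation+year" else s
  if PySem.Set.contains s1 "graduation" && PySem.Set.contains s1 "month"
  then PySem.Set.add s1 "graduation+month" else s1

-- hits = [_PRI[t] for t in found if t in _PRI]
def pvHits (l : String) : List Int :=
  (pvCombine (pvScan l)).filterMap (fun t => PySem.Dict.get? pvPriDict t)

-- 'if not hits: …; kind, arg = _ACT[min(hits)]; …'
def pvFuzzyB (l : String) (known : List (String × String)) : Option String :=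
  if (pvHits l).isEmpty then none
  else match PySem.List.min? (pvHits l) (fun x => x) with
  | none => none                    -- unreachable: hits ≠ []
  | some m =>
    match PySem.List.pyGet? pvActs m with
    | none => none                  -- unreachable: 0 ≤ m < 24
    | some (kind, arg) =>
      if kind = "k" then pvLookup known arg
      else if kind = "v" then some arg
      else match pvLookup known "first_name", pvLookup known "last_name" with
        | some f, some s => some (f ++ " " ++ s)
        | _, _ => none              -- KeyError in Python; excluded by Pre_

def value_for_label_py_alt (label : String) (known : List (String × String)) (personal : List (String × String)) : Option String :=
  let l := PySem.Str.strip (PySem.Str.lower label)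
  if l = "" then none
  else match pvDirectLoop l known with
  | some v => some v
  | none => pvFuzzyB l known

-- ===== PRECONDITION & SPEC =====
def pvIn (sub l : String) : Bool := PySem.Str.isIn sub l
def pvHasKey (known : List (String × String)) (k : String) : Bool :=
  PySem.Dict.contains (PySem.Dict.mk known) k

-- profile keys the first applicable fuzzy branch looks up (in A's branch order; [] for the
-- literal June/Yes/No branches and when no branch applies)
def pvNeeds (l : String) : List String :=
  if pvIn "first name" l || pvIn "given name" l then ["first_name"]
  else if pvIn "last name" l || pvIn "surname" l || pvIn "family name" l then ["last_name"]
  else if pvIn "email" l then ["email"]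
  else if pvIn "phone" l || pvIn "mobile" l || pvIn "tel" l then ["phone"]
  else if pvIn "linkedin" l then ["linkedin"]
  else if pvIn "github" l then ["github"]
  else if pvIn "website" l || pvIn "portfolio" l || pvIn "url" l then ["website"]
  else if pvIn "school" l || pvIn "university" l || pvIn "college" l || pvIn "institution" l then ["school_name"]
  else if pvIn "degree" l then ["degree"]
  else if pvIn "major" l || pvIn "discipline" l || pvIn "field of study" l then ["discipline"]
  else if pvIn "gpa" l then ["gpa"]
  else if pvIn "graduation" l && pvIn "year" l then ["end_year"]
  else if pvIn "graduation" l && pvIn "month" l then []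
  else if pvIn "authorized" l || pvIn "eligible to work" l || pvIn "work authorization" l then []
  else if pvIn "sponsor" l || pvIn "visa" l then []
  else if pvIn "gender" l then ["gender"]
  else if pvIn "race" l || pvIn "ethnic" l then ["race"]
  else if pvIn "veteran" l then ["veteran_status"]
  else if pvIn "disability" l || pvIn "disabled" l then ["disability_status"]
  else if pvIn "referral" l || pvIn "hear about" l || pvIn "source" l || pvIn "how did you" l then ["referral"]
  else if pvIn "city" l || pvIn "location" l then ["city"]
  else if pvIn "state" l then ["state"]
  else if pvIn "country" l then ["country"]
  else if pvIn "name" l then ["first_name", "last_name"]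
  else []

-- Pre_ excludes exactly the inputs on which both Pythons raise KeyError: a nonempty lowered/stripped
-- label with no direct key hit whose first applicable fuzzy branch looks up a profile key absent from known.
def Pre_value_for_label_py (label : String) (known : List (String × String)) (personal : List (String × String)) : Prop :=
  let l := PySem.Str.strip (PySem.Str.lower label)
  l = ""
  ∨ (known.any fun kv => pvIn (PySem.Str.replace kv.1 "_" " ") l
       || PySem.Str.startswith l (PySem.Str.replace kv.1 "_" " ")) = true
  ∨ ∀ k ∈ pvNeeds l, pvHasKey known k = true

instance (label : String) (known : List (String × String)) (personal : List (String × String)) : Decidable (Pre_value_for_label_py label known personal) := by unfold Pre_value_for_label_py; infer_instance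

def pvWitness_value_for_label_py : String × (List (String × String)) × (List (String × String)) :=
  ("  Email Address ", [("email", "e@x.com")], [])

def Spec_value_for_label_py (label : String) (known : List (String × String)) (personal : List (String × String)) (out : Option String) : Prop := out = value_for_label_py_alt label known personal
instance (label : String) (known : List (String × String)) (personal : List (String × String)) (out : Option String) : Decidable (Spec_value_for_label_py label known personal out) := by unfold Spec_value_for_label_py; infer_instance

-- ===== CLAIM (what is proved, stated in full; the proofs are below) =====
def Claim_equal_value_for_label_py : Prop := ∀ (label : String) (known : List (String × String)) (personal : List (String × String)), Dom_value_for_label_py label known personal → Pre_value_for_label_py label known personal → Spec_value_for_label_py label known personal (value_for_label_py label known personal)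

-- ===== LEMMAS AND PROOFS =====

-- the 24 rule conditions of A's chain, in order
def pvConds (l : String) : List Bool :=
  [pvIn "first name" l || pvIn "given name" l,
   pvIn "last name" l || pvIn "surname" l || pvIn "family name" l,
   pvIn "email" l,
   pvIn "phone" l || pvIn "mobile" l || pvIn "tel" l,
   pvIn "linkedin" l,
   pvIn "github" l,
   pvIn "website" l || pvIn "portfolio" l || pvIn "url" l,
   pvIn "school" l || pvIn "university" l || pvIn "college" l || pvIn "institution" l,
   pvIn "degree" l,
   pvIn "major" l || pvIn "discipline" l || pvIn "field of study" l,
   pvIn "gpa" l,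
   pvIn "graduation" l && pvIn "year" l,
   pvIn "graduation" l && pvIn "month" l,
   pvIn "authorized" l || pvIn "eligible to work" l || pvIn "work authorization" l,
   pvIn "sponsor" l || pvIn "visa" l,
   pvIn "gender" l,
   pvIn "race" l || pvIn "ethnic" l,
   pvIn "veteran" l,
   pvIn "disability" l || pvIn "disabled" l,
   pvIn "referral" l || pvIn "hear about" l || pvIn "source" l || pvIn "how did you" l,
   pvIn "city" l || pvIn "location" l,
   pvIn "state" l,
   pvIn "country" l,
   pvIn "name" l]

def pvFirstFire (l : String) : Option Nat := List.findIdx? (fun c => c) (pvConds l)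

-- what A returns for the rule of index n
def pvRuleVal (known : List (String × String)) : Nat → Option String
  | 0 => pvLookup known "first_name"
  | 1 => pvLookup known "last_name"
  | 2 => pvLookup known "email"
  | 3 => pvLookup known "phone"
  | 4 => pvLookup known "linkedin"
  | 5 => pvLookup known "github"
  | 6 => pvLookup known "website"
  | 7 => pvLookup known "school_name"
  | 8 => pvLookup known "degree"
  | 9 => pvLookup known "discipline"
  | 10 => pvLookup known "gpa"
  | 11 => pvLookup known "end_year"
  | 12 => some "June"
  | 13 => some "Yes"
  | 14 => some "No"
  | 15 => pvLookup known "gender"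
  | 16 => pvLookup known "race"
  | 17 => pvLookup known "veteran_status"
  | 18 => pvLookup known "disability_status"
  | 19 => pvLookup known "referral"
  | 20 => pvLookup known "city"
  | 21 => pvLookup known "state"
  | 22 => pvLookup known "country"
  | 23 => match pvLookup known "first_name", pvLookup known "last_name" with
          | some f, some s => some (f ++ " " ++ s)
          | _, _ => none
  | _ => none

-- A's chain as "first true condition wins" over (condition, value) pairs
def pvChainOf : List (Bool × Option String) → Option String
  | [] => none
  | (c, v) :: rest => if c then v else pvChainOf rest

def pvPairs (l : String) (known : List (String × String)) : List (Bool × Option String) :=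
  (pvConds l).zip ((List.range 24).map (pvRuleVal known))

theorem pvChainOf_eq_findIdx? (ps : List (Bool × Option String)) :
    pvChainOf ps = match List.findIdx? (fun q => q.1) ps with
                   | none => none
                   | some n => (ps.getD n (false, none)).2 := by
  induction ps with
  | nil => rfl
  | cons p rest ih =>
    obtain ⟨c, v⟩ := p
    rw [List.findIdx?_cons]
    by_cases hc : c = true
    · simp [pvChainOf, hc]
    · simp only [Bool.not_eq_true] at hc
      subst hc
      simp only [pvChainOf, Bool.false_eq_true, if_false]
      rw [ih]
      cases List.findIdx? (fun q => q.1) rest <;> simp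

theorem pvChainA_eq_chainOf (l : String) (known : List (String × String)) :
    pvChainA l known = pvChainOf (pvPairs l known) := rfl

theorem pvFindIdx?_pairs (l : String) (known : List (String × String)) :
    List.findIdx? (fun q => q.1) (pvPairs l known) = pvFirstFire l := by
  have hm : (pvPairs l known).map Prod.fst = pvConds l := rfl
  unfold pvFirstFire
  rw [← hm, List.findIdx?_map]
  rfl

theorem pvConds_length (l : String) : (pvConds l).length = 24 := rfl

theorem pvChainA_eq_firstFire (l : String) (known : List (String × String)) :
    pvChainA l known = match pvFirstFire l with
                       | none => none
                       | some n => pvRuleVal known n := by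
  rw [pvChainA_eq_chainOf, pvChainOf_eq_findIdx?, pvFindIdx?_pairs]
  cases h : pvFirstFire l with
  | none => rfl
  | some n =>
    obtain ⟨hlt, -, -⟩ := List.findIdx?_eq_some_iff_getElem.mp h
    rw [pvConds_length] at hlt
    interval_cases n <;> rfl

-- membership in the guarded fold-add over the pattern list
theorem pvMem_inner (g : String → Bool) (ps : List String) :
    ∀ (acc : PySem.Set String) (y : String),
      (y ∈ ps.foldl (fun a p => if g p then PySem.Set.add a p else a) acc ↔
        y ∈ acc ∨ (y ∈ ps ∧ g y = true)) := by
  induction ps with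
  | nil => intro acc y; simp
  | cons p rest ih =>
    intro acc y
    simp only [List.foldl_cons]
    rw [ih]
    by_cases hg : g p = true
    · simp only [hg, if_true, PySem.Set.mem_add]
      constructor
      · rintro ((hy | rfl) | ⟨hy, hgy⟩)
        · exact Or.inl hy
        · exact Or.inr ⟨List.mem_cons_self .., hg⟩
        · exact Or.inr ⟨List.mem_cons_of_mem _ hy, hgy⟩
      · rintro (hy | ⟨hy, hgy⟩)
        · exact Or.inl (Or.inl hy)
        · rcases List.mem_cons.mp hy with rfl | hy
          · exact Or.inl (Or.inr rfl)
          · exact Or.inr ⟨hy, hgy⟩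
    · simp only [hg, if_false]
      constructor
      · rintro (hy | ⟨hy, hgy⟩)
        · exact Or.inl hy
        · exact Or.inr ⟨List.mem_cons_of_mem _ hy, hgy⟩
      · rintro (hy | ⟨hy, hgy⟩)
        · exact Or.inl hy
        · rcases List.mem_cons.mp hy with rfl | hy
          · exact absurd hgy hg
          · exact Or.inr ⟨hy, hgy⟩

theorem pvMem_scan_aux (l : String) (is : List Nat) :
    ∀ (acc : PySem.Set String) (y : String),
      (y ∈ is.foldl (fun acc i =>
          pvPatterns.foldl (fun acc p =>
            if PySem.Chars.startswith (l.toList.drop i) p.toList then PySem.Set.add acc p else acc) acc) acc ↔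
        y ∈ acc ∨ ∃ i ∈ is, y ∈ pvPatterns ∧
          PySem.Chars.startswith (l.toList.drop i) y.toList = true) := by
  induction is with
  | nil => intro acc y; simp
  | cons i rest ih =>
    intro acc y
    simp only [List.foldl_cons]
    rw [ih, pvMem_inner]
    constructor
    · rintro ((hy | ⟨hp, hs⟩) | ⟨i', hi', hp, hs⟩)
      · exact Or.inl hy
      · exact Or.inr ⟨i, List.mem_cons_self .., hp, hs⟩
      · exact Or.inr ⟨i', List.mem_cons_of_mem _ hi', hp, hs⟩
    · rintro (hy | ⟨i', hi', hp, hs⟩)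
      · exact Or.inl (Or.inl hy)
      · rcases List.mem_cons.mp hi' with rfl | hi'
        · exact Or.inl (Or.inr ⟨hp, hs⟩)
        · exact Or.inr ⟨i', hi', hp, hs⟩

theorem pvPatterns_ne_nil : ∀ t ∈ pvPatterns, t.toList ≠ [] := by decide

theorem pvMem_scan (l : String) (y : String) :
    y ∈ pvScan l ↔ y ∈ pvPatterns ∧ PySem.Str.isIn y l = true := by
  unfold pvScan
  rw [pvMem_scan_aux]
  constructor
  · rintro (hy | ⟨i, hi, hp, hs⟩)
    · exact absurd hy (by simp [PySem.Set.empty])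
    · refine ⟨hp, ?_⟩
      rw [PySem.Str.isIn_eq, ← PySem.Chars.exists_prefix_drop_iff_isIn]
      exact ⟨i, (PySem.Chars.startswith_iff _ _).mp hs⟩
  · rintro ⟨hp, hin⟩
    right
    rw [PySem.Str.isIn_eq, ← PySem.Chars.exists_prefix_drop_iff_isIn] at hin
    obtain ⟨j, hj⟩ := hin
    have hjl : j < l.toList.length := by
      by_contra hge
      rw [List.drop_eq_nil_of_le (by omega)] at hj
      exact absurd (List.prefix_nil.mp hj) (pvPatterns_ne_nil y hp)
    exact ⟨j, List.mem_range.mpr hjl, hp, (PySem.Chars.startswith_iff _ _).mpr hj⟩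

-- membership through the two graduation 'add' statements
theorem pvMem_combine (s : PySem.Set String) (t : String) :
    t ∈ pvCombine s ↔
      t ∈ s ∨ (t = "graduation+year" ∧ "graduation" ∈ s ∧ "year" ∈ s)
            ∨ (t = "graduation+month" ∧ "graduation" ∈ s ∧ "month" ∈ s) := by
  by_cases hg : "graduation" ∈ s <;> by_cases hy : "year" ∈ s <;> by_cases hm : "month" ∈ s <;>
    simp_all [pvCombine, PySem.Set.mem_add, PySem.Set.contains_iff] <;>
    tauto

-- j is a hit iff rule j fires (0 ≤ j < 24 and condition j holds)
def pvFireI (l : String) (j : Int) : Bool :=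
  decide (0 ≤ j) && decide (j < 24) && (pvConds l).getD j.toNat false

set_option maxHeartbeats 2000000 in
theorem pvHits_fire (l : String) (j : Int) (hj : j ∈ pvHits l) : pvFireI l j = true := by
  unfold pvHits at hj
  obtain ⟨t, ht, hjt⟩ := List.mem_filterMap.mp hj
  rcases (pvMem_combine _ _).mp ht with hts | ⟨rfl, hg, hy⟩ | ⟨rfl, hg, hm⟩
  · obtain ⟨htp, hin⟩ := (pvMem_scan _ _).mp hts
    clear hj ht hts
    fin_cases htp <;>
      first
        | (obtain rfl := (Option.some.inj hjt).symm
           first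
             | exact hin
             | ((simp [pvFireI, pvConds, pvIn, PySem.Str.isIn_eq] at hin ⊢) <;> tauto))
        | (exfalso; simp [pvPriDict, PySem.Dict.get?] at hjt)
  · obtain ⟨-, hgin⟩ := (pvMem_scan _ _).mp hg
    obtain ⟨-, hyin⟩ := (pvMem_scan _ _).mp hy
    obtain rfl := (Option.some.inj hjt).symm
    (simp [pvFireI, pvConds, pvIn, PySem.Str.isIn_eq] at hgin hyin ⊢) <;> tauto
  · obtain ⟨-, hgin⟩ := (pvMem_scan _ _).mp hg
    obtain ⟨-, hmin⟩ := (pvMem_scan _ _).mp hm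
    obtain rfl := (Option.some.inj hjt).symm
    (simp [pvFireI, pvConds, pvIn, PySem.Str.isIn_eq] at hgin hmin ⊢) <;> tauto

theorem pvHit_pat (l : String) (t : String) (j : Int) (htp : t ∈ pvPatterns)
    (hjt : PySem.Dict.get? pvPriDict t = some j) (hin : PySem.Str.isIn t l = true) :
    j ∈ pvHits l := by
  unfold pvHits
  exact List.mem_filterMap.mpr ⟨t,
    (pvMem_combine _ _).mpr (Or.inl ((pvMem_scan _ _).mpr ⟨htp, hin⟩)), hjt⟩

theorem pvHit_year (l : String) (hg : PySem.Str.isIn "graduation" l = true)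
    (hy : PySem.Str.isIn "year" l = true) : (11 : Int) ∈ pvHits l := by
  unfold pvHits
  refine List.mem_filterMap.mpr ⟨"graduation+year", (pvMem_combine _ _).mpr ?_, rfl⟩
  exact Or.inr (Or.inl ⟨rfl, (pvMem_scan _ _).mpr ⟨by decide, hg⟩,
    (pvMem_scan _ _).mpr ⟨by decide, hy⟩⟩)

theorem pvHit_month (l : String) (hg : PySem.Str.isIn "graduation" l = true)
    (hm : PySem.Str.isIn "month" l = true) : (12 : Int) ∈ pvHits l := by
  unfold pvHits
  refine List.mem_filterMap.mpr ⟨"graduation+month", (pvMem_combine _ _).mpr ?_, rfl⟩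
  exact Or.inr (Or.inr ⟨rfl, (pvMem_scan _ _).mpr ⟨by decide, hg⟩,
    (pvMem_scan _ _).mpr ⟨by decide, hm⟩⟩)

set_option maxHeartbeats 1000000 in
theorem pvFire_hits (l : String) (n : Nat) (hn : n < 24)
    (hc : (pvConds l).getD n false = true) : (n : Int) ∈ pvHits l := by
  interval_cases n
  · rcases (by simpa [pvConds, pvIn] using hc :
        (PySem.Str.isIn "first name" l = true) ∨ PySem.Str.isIn "given name" l = true) with h|h <;>
      exact pvHit_pat l _ _ (by decide) rfl h
  · rcases (by simpa [pvConds, pvIn] using hc :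
        ((PySem.Str.isIn "last name" l = true) ∨ PySem.Str.isIn "surname" l = true) ∨ PySem.Str.isIn "family name" l = true) with (h|h)|h <;>
      exact pvHit_pat l _ _ (by decide) rfl h
  · exact pvHit_pat l _ _ (by decide) rfl hc
  · rcases (by simpa [pvConds, pvIn] using hc :
        ((PySem.Str.isIn "phone" l = true) ∨ PySem.Str.isIn "mobile" l = true) ∨ PySem.Str.isIn "tel" l = true) with (h|h)|h <;>
      exact pvHit_pat l _ _ (by decide) rfl h
  · exact pvHit_pat l _ _ (by decide) rfl hc
  · exact pvHit_pat l _ _ (by decide) rfl hc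
  · rcases (by simpa [pvConds, pvIn] using hc :
        ((PySem.Str.isIn "website" l = true) ∨ PySem.Str.isIn "portfolio" l = true) ∨ PySem.Str.isIn "url" l = true) with (h|h)|h <;>
      exact pvHit_pat l _ _ (by decide) rfl h
  · rcases (by simpa [pvConds, pvIn] using hc :
        (((PySem.Str.isIn "school" l = true) ∨ PySem.Str.isIn "university" l = true) ∨ PySem.Str.isIn "college" l = true) ∨ PySem.Str.isIn "institution" l = true) with ((h|h)|h)|h <;>
      exact pvHit_pat l _ _ (by decide) rfl h
  · exact pvHit_pat l _ _ (by decide) rfl hc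
  · rcases (by simpa [pvConds, pvIn] using hc :
        ((PySem.Str.isIn "major" l = true) ∨ PySem.Str.isIn "discipline" l = true) ∨ PySem.Str.isIn "field of study" l = true) with (h|h)|h <;>
      exact pvHit_pat l _ _ (by decide) rfl h
  · exact pvHit_pat l _ _ (by decide) rfl hc
  · obtain ⟨hg, hx⟩ : PySem.Str.isIn "graduation" l = true ∧ PySem.Str.isIn "year" l = true := by
      simpa [pvConds, pvIn] using hc
    exact pvHit_year l hg hx
  · obtain ⟨hg, hx⟩ : PySem.Str.isIn "graduation" l = true ∧ PySem.Str.isIn "month" l = true := by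
      simpa [pvConds, pvIn] using hc
    exact pvHit_month l hg hx
  · rcases (by simpa [pvConds, pvIn] using hc :
        ((PySem.Str.isIn "authorized" l = true) ∨ PySem.Str.isIn "eligible to work" l = true) ∨ PySem.Str.isIn "work authorization" l = true) with (h|h)|h <;>
      exact pvHit_pat l _ _ (by decide) rfl h
  · rcases (by simpa [pvConds, pvIn] using hc :
        (PySem.Str.isIn "sponsor" l = true) ∨ PySem.Str.isIn "visa" l = true) with h|h <;>
      exact pvHit_pat l _ _ (by decide) rfl h
  · exact pvHit_pat l _ _ (by decide) rfl hc
  · rcases (by simpa [pvConds, pvIn] using hc :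
        (PySem.Str.isIn "race" l = true) ∨ PySem.Str.isIn "ethnic" l = true) with h|h <;>
      exact pvHit_pat l _ _ (by decide) rfl h
  · exact pvHit_pat l _ _ (by decide) rfl hc
  · rcases (by simpa [pvConds, pvIn] using hc :
        (PySem.Str.isIn "disability" l = true) ∨ PySem.Str.isIn "disabled" l = true) with h|h <;>
      exact pvHit_pat l _ _ (by decide) rfl h
  · rcases (by simpa [pvConds, pvIn] using hc :
        (((PySem.Str.isIn "referral" l = true) ∨ PySem.Str.isIn "hear about" l = true) ∨ PySem.Str.isIn "source" l = true) ∨ PySem.Str.isIn "how did you" l = true) with ((h|h)|h)|h <;>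
      exact pvHit_pat l _ _ (by decide) rfl h
  · rcases (by simpa [pvConds, pvIn] using hc :
        (PySem.Str.isIn "city" l = true) ∨ PySem.Str.isIn "location" l = true) with h|h <;>
      exact pvHit_pat l _ _ (by decide) rfl h
  · exact pvHit_pat l _ _ (by decide) rfl hc
  · exact pvHit_pat l _ _ (by decide) rfl hc
  · exact pvHit_pat l _ _ (by decide) rfl hc

theorem pvGlue (l : String) :
    PySem.List.min? (pvHits l) (fun x => x) = Option.map (fun n => Int.ofNat n) (pvFirstFire l) := by
  cases h : pvFirstFire l with
  | none =>
    have hnone := List.findIdx?_eq_none_iff.mp h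
    have hemp : pvHits l = [] := by
      rcases hh : pvHits l with - | ⟨j, rest⟩
      · rfl
      · exfalso
        have hj : j ∈ pvHits l := by rw [hh]; exact List.mem_cons_self ..
        have hf := pvHits_fire l j hj
        simp only [pvFireI, Bool.and_eq_true, decide_eq_true_eq] at hf
        obtain ⟨⟨h0, h24⟩, hc⟩ := hf
        have hlt : j.toNat < (pvConds l).length := by rw [pvConds_length]; omega
        rw [List.getD_eq_getElem _ _ hlt] at hc
        have := hnone ((pvConds l)[j.toNat]) (List.getElem_mem hlt)
        simp_all
    rw [hemp]
    simp [PySem.List.min?_eq_none_iff]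
  | some n =>
    obtain ⟨hlt, hcn, hprev⟩ := List.findIdx?_eq_some_iff_getElem.mp h
    have hn24 : n < 24 := by rw [pvConds_length] at hlt; exact hlt
    have hmem : (n : Int) ∈ pvHits l :=
      pvFire_hits l n hn24 (by rw [List.getD_eq_getElem _ _ hlt]; simpa using hcn)
    cases hm : PySem.List.min? (pvHits l) (fun x => x) with
    | none =>
      rw [PySem.List.min?_eq_none_iff] at hm
      rw [hm] at hmem
      exact absurd hmem (List.not_mem_nil)
    | some m =>
      have hle : m ≤ (n : Int) := PySem.List.min?_isMin hm _ hmem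
      have hmm : m ∈ pvHits l := PySem.List.min?_mem hm
      have hf := pvHits_fire l m hmm
      simp only [pvFireI, Bool.and_eq_true, decide_eq_true_eq] at hf
      obtain ⟨⟨h0, h24⟩, hc⟩ := hf
      have hge : n ≤ m.toNat := by
        by_contra hlt'
        have hlt' : m.toNat < n := by omega
        have hlt2 : m.toNat < (pvConds l).length := by rw [pvConds_length]; omega
        rw [List.getD_eq_getElem _ _ hlt2] at hc
        have := hprev m.toNat hlt'
        simp_all
      have hmn : m = (n : Int) := by omega
      rw [hmn]
      simp

theorem pvFuzzyB_eq (l : String) (known : List (String × String)) :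
    pvFuzzyB l known = pvChainA l known := by
  rw [pvChainA_eq_firstFire]
  unfold pvFuzzyB
  cases h : pvFirstFire l with
  | none =>
    have hmin := pvGlue l
    rw [h] at hmin
    have hemp : pvHits l = [] :=
      (PySem.List.min?_eq_none_iff (pvHits l) (fun x : Int => x)).mp (by simpa using hmin)
    simp [hemp]
  | some n =>
    have hmin := pvGlue l
    rw [h] at hmin
    have hmin' : PySem.List.min? (pvHits l) (fun x => x) = some (Int.ofNat n) := by
      simpa using hmin
    have hne : pvHits l ≠ [] := by
      intro he
      rw [he] at hmin'
      simp [PySem.List.min?] at hmin'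
    obtain ⟨hlt, -, -⟩ := List.findIdx?_eq_some_iff_getElem.mp h
    rw [pvConds_length] at hlt
    rw [List.isEmpty_eq_false_iff.mpr hne]
    simp only [Bool.false_eq_true, if_false, hmin']
    interval_cases n <;> rfl

-- ===== VERDICT (by name: the statement is the Claim_ definition above) =====
theorem value_for_label_py_spec : Claim_equal_value_for_label_py := by
  intro label known personal _ _
  unfold Spec_value_for_label_py value_for_label_py value_for_label_py_alt
  simp only [pvFuzzyB_eq]
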